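-- pv_equiv track=rewrite | github.com/xhinini/agent-based-issue-resolution | utils/classify_subcategories.py | _count_class1_distributions
-- ===== SOURCE A (Python) =====
-- from typing import Dict, List, Optional
--
-- def _count_class1_distributions(rows: List[Dict[str, str]]) -> (Dict[str, int], Dict[str, Dict[str, int]]):
--     overall: Dict[str, int] = {}
--     by_model: Dict[str, Dict[str, int]] = {}
--     for r in rows:
--         if (r.get('class') or '').strip() != '1':
--             continue
--         sub = (r.get('subcategory') or '').strip()
--         if not sub:
--             continue
--         overall[sub] = overall.get(sub, 0) + 1
--         m = (r.get('model_name') or '').strip()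
--         by_model.setdefault(m, {})
--         by_model[m][sub] = by_model[m].get(sub, 0) + 1
--     return overall, by_model
-- ===== SOURCE B (Python) =====
-- from typing import Dict, List, Optional
--
-- def _tally(xs) -> Dict[str, int]:
--     d: Dict[str, int] = {}
--     for x in xs:
--         d[x] = d.get(x, 0) + 1
--     return d
--
-- def _count_class1_distributions(rows: List[Dict[str, str]]) -> (Dict[str, int], Dict[str, Dict[str, int]]):
--     # first pass: keep only the qualifying (model, subcategory) pairs
--     pairs = []
--     for r in rows:
--         if (r.get('class') or '').strip() == '1':
--             sub = (r.get('subcategory') or '').strip()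
--             if sub:
--                 pairs.append(((r.get('model_name') or '').strip(), sub))
--     overall = _tally(s for _, s in pairs)
--     models = list(dict.fromkeys(m for m, _ in pairs))
--     by_model = {m: _tally(s for mm, s in pairs if mm == m) for m in models}
--     return overall, by_model
-- ===== Notes on version B (the rewrite author's own statement) =====
-- stated objective: alternative
-- what changed: A threads two dicts through one pass with setdefault and in-place nested updates; B first filters the rows into a flat list of (model, subcategory) pairs, then derives 'overall' by tallying the subcategory column, the model key order by ordered dedup (dict.fromkeys), and 'by_model' by tallying each model's filtered pairs in a comprehension.
import Mathlib
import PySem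

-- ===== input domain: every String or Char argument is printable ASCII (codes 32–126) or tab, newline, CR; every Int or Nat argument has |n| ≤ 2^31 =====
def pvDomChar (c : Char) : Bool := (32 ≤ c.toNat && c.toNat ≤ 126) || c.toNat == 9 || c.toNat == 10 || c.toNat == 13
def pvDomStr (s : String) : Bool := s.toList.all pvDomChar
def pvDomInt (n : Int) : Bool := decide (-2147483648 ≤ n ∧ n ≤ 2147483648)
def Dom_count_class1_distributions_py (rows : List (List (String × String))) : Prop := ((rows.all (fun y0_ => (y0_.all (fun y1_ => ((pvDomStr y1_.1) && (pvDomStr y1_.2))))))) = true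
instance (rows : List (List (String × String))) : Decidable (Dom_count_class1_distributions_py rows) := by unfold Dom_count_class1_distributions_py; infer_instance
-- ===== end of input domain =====

-- B replaces A's single pass threading two dicts by a filter-into-pairs pass followed by
-- independent tallies (overall, ordered-dedup model keys, per-model tally); equivalence of the
-- RETURN values is proved for all inputs (both are total).

-- shared row accessor: (r.get(k) or '').strip()
def pvField (r : List (String × String)) (k : String) : String :=
  PySem.Str.strip (((PySem.Dict.ofList r).get? k).getD "")

-- ===== PORT A =====
-- loop body of A's single pass (named so the proofs can speak about it)
def pvAStep (st : PySem.Dict String Int × PySem.Dict String (PySem.Dict String Int))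
    (r : List (String × String)) :
    PySem.Dict String Int × PySem.Dict String (PySem.Dict String Int) :=
  if pvField r "class" ≠ "1" then st
  else
    let sub := pvField r "subcategory"
    if sub = "" then st
    else
      let ov := st.1.insert sub (st.1.getD sub 0 + 1)
      let m := pvField r "model_name"
      let bm := st.2.setdefault m PySem.Dict.empty
      let inner := bm.getD m PySem.Dict.empty
      (ov, bm.insert m (inner.insert sub (inner.getD sub 0 + 1)))

def count_class1_distributions_py (rows : List (List (String × String))) :
    (List (String × Int)) × (List (String × List (String × Int))) :=
  let st := rows.foldl pvAStep (PySem.Dict.empty, PySem.Dict.empty)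
  (st.1.items, st.2.items.map (fun p => (p.1, p.2.items)))

-- ===== PORT B =====
-- the qualifying (model, subcategory) pair of a row, if any
def pvQual (r : List (String × String)) : Option (String × String) :=
  if pvField r "class" = "1" then
    let sub := pvField r "subcategory"
    if sub = "" then none else some (pvField r "model_name", sub)
  else none

-- port of B's helper _tally
def pvTally (xs : List String) : PySem.Dict String Int :=
  xs.foldl (fun d x => d.insert x (d.getD x 0 + 1)) PySem.Dict.empty

def count_class1_distributions_py_alt (rows : List (List (String × String))) :
    (List (String × Int)) × (List (String × List (String × Int))) :=
  let pairs := rows.filterMap pvQual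
  let overall := pvTally (pairs.map Prod.snd)
  let models := PySem.List.dedup (pairs.map Prod.fst)
  let by_model := models.map
    (fun m => (m, (pvTally ((pairs.filter (fun p => p.1 == m)).map Prod.snd)).items))
  (overall.items, by_model)

-- ===== PRECONDITION & SPEC =====
def Spec_count_class1_distributions_py (rows : List (List (String × String))) (out : (List (String × Int)) × (List (String × List (String × Int)))) : Prop := out = count_class1_distributions_py_alt rows
instance (rows : List (List (String × String))) (out : (List (String × Int)) × (List (String × List (String × Int)))) : Decidable (Spec_count_class1_distributions_py rows out) := by unfold Spec_count_class1_distributions_py; infer_instance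

-- ===== CLAIM (what is proved, stated in full; the proofs are below) =====
def Claim_equal_count_class1_distributions_py : Prop := ∀ (rows : List (List (String × String))), Dom_count_class1_distributions_py rows → Spec_count_class1_distributions_py rows (count_class1_distributions_py rows)

-- ===== LEMMAS AND PROOFS =====

-- A's loop body, re-expressed on a qualifying pair (proof-only helper)
def pvPairStep (st : PySem.Dict String Int × PySem.Dict String (PySem.Dict String Int))
    (p : String × String) :
    PySem.Dict String Int × PySem.Dict String (PySem.Dict String Int) :=
  let ov := st.1.insert p.2 (st.1.getD p.2 0 + 1)
  let bm := st.2.setdefault p.1 PySem.Dict.empty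
  let inner := bm.getD p.1 PySem.Dict.empty
  (ov, bm.insert p.1 (inner.insert p.2 (inner.getD p.2 0 + 1)))

lemma pvAStep_eq_qual (st : PySem.Dict String Int × PySem.Dict String (PySem.Dict String Int))
    (r : List (String × String)) :
    pvAStep st r = (pvQual r).elim st (pvPairStep st) := by
  unfold pvAStep pvQual pvPairStep
  by_cases h1 : pvField r "class" = "1" <;> by_cases h2 : pvField r "subcategory" = "" <;>
    simp [h1, h2]

lemma foldl_pvAStep_filterMap (rows : List (List (String × String)))
    (st : PySem.Dict String Int × PySem.Dict String (PySem.Dict String Int)) :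
    rows.foldl pvAStep st = (rows.filterMap pvQual).foldl pvPairStep st := by
  induction rows generalizing st with
  | nil => rfl
  | cons r rs ih =>
    simp only [List.foldl_cons, List.filterMap_cons, pvAStep_eq_qual]
    cases h : pvQual r <;> simp [ih]

lemma pvTally_append_singleton (xs : List String) (x : String) :
    pvTally (xs ++ [x]) = (pvTally xs).insert x ((pvTally xs).getD x 0 + 1) := by
  simp [pvTally, List.foldl_append]

-- the per-model tally map (proof-only helper)
def pvGroup (ps : List (String × String)) (m : String) : String × PySem.Dict String Int :=
  (m, pvTally ((ps.filter (fun p => p.1 == m)).map Prod.snd))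

lemma pvGroup_append_ne (ps : List (String × String)) (p : String × String) (m : String)
    (h : p.1 ≠ m) : pvGroup (ps ++ [p]) m = pvGroup ps m := by
  simp [pvGroup, List.filter_append, h]

lemma pvD_keys (ps : List (String × String)) :
    (PySem.Dict.mk ((PySem.Set.ofList (ps.map Prod.fst)).map (pvGroup ps))).keys =
      PySem.Set.ofList (ps.map Prod.fst) := by
  simp [PySem.Dict.keys_mk, List.map_map, Function.comp_def, pvGroup]

lemma pvD_contains (ps : List (String × String)) (m : String) :
    (PySem.Dict.mk ((PySem.Set.ofList (ps.map Prod.fst)).map (pvGroup ps))).contains m =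
      decide (m ∈ ps.map Prod.fst) := by
  rw [PySem.Dict.contains_eq_decide_mem_keys, pvD_keys]
  simp [PySem.Set.mem_ofList]

lemma pvD_getD (ps : List (String × String)) (m : String) (hm : m ∈ ps.map Prod.fst) :
    (PySem.Dict.mk ((PySem.Set.ofList (ps.map Prod.fst)).map (pvGroup ps))).getD m
      PySem.Dict.empty = pvTally ((ps.filter (fun p => p.1 == m)).map Prod.snd) := by
  apply PySem.Dict.getD_of_mem_items
  · show (m, _) ∈ _
    have : pvGroup ps m ∈ (PySem.Set.ofList (ps.map Prod.fst)).map (pvGroup ps) :=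
      List.mem_map_of_mem ((PySem.Set.mem_ofList _ _).mpr hm)
    simpa [pvGroup] using this
  · rw [pvD_keys]
    exact PySem.Set.nodup_ofList _

lemma pvInvariant (ps : List (String × String)) :
    ps.foldl pvPairStep (PySem.Dict.empty, PySem.Dict.empty) =
      (pvTally (ps.map Prod.snd),
       PySem.Dict.mk ((PySem.Set.ofList (ps.map Prod.fst)).map (pvGroup ps))) := by
  induction ps using List.reverseRecOn with
  | nil => rfl
  | append_singleton ps p ih =>
    rw [List.foldl_append, ih]
    unfold pvPairStep
    simp only [List.foldl_cons, List.foldl_nil]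
    refine Prod.ext ?_ ?_
    · show _ = pvTally ((ps ++ [p]).map Prod.snd)
      simp only [List.map_append, List.map_cons, List.map_nil, pvTally_append_singleton]
    · show (_ : PySem.Dict String (PySem.Dict String Int)) = _
      by_cases hm : p.1 ∈ ps.map Prod.fst
      · -- the model key is already present: setdefault is a no-op, insert replaces in place
        have hc : (PySem.Dict.mk ((PySem.Set.ofList (ps.map Prod.fst)).map (pvGroup ps))).contains p.1 = true := by
          rw [pvD_contains]; simpa using hm
        rw [PySem.Dict.setdefault_of_contains _ _ hc]
        apply PySem.Dict.ext
        rw [PySem.Dict.items_insert_of_contains _ _ hc]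
        show _ = ((PySem.Set.ofList ((ps ++ [p]).map Prod.fst)).map (pvGroup (ps ++ [p])))
        simp only [List.map_append, List.map_cons, List.map_nil]
        rw [PySem.Set.ofList_append_singleton,
          PySem.Set.add_of_mem ((PySem.Set.mem_ofList _ _).mpr (by simpa using hm)),
          pvD_getD ps p.1 hm]
        show List.map _ (List.map _ _) = _
        rw [List.map_map]
        apply List.map_congr_left
        intro m hmem
        by_cases hpm : p.1 = m
        · subst hpm
          simp only [Function.comp_apply, pvGroup, beq_self_eq_true, if_pos]
          simp [List.filter_append, pvTally_append_singleton]
        · have hbe : (m == p.1) = false := by simpa using fun h' => hpm h'.symm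
          simp only [Function.comp_apply, pvGroup, hbe, Bool.false_eq_true, if_false]
          simpa [pvGroup] using (pvGroup_append_ne ps p m hpm).symm
      · -- a new model key: setdefault appends an empty dict, then it is filled
        have hc : (PySem.Dict.mk ((PySem.Set.ofList (ps.map Prod.fst)).map (pvGroup ps))).contains p.1 = false := by
          rw [pvD_contains]; simpa using hm
        rw [PySem.Dict.setdefault_of_not_contains _ _ hc, PySem.Dict.getD_insert_self,
          PySem.Dict.insert_insert_self]
        apply PySem.Dict.ext
        rw [PySem.Dict.items_insert_of_not_contains _ _ hc]
        show _ = ((PySem.Set.ofList ((ps ++ [p]).map Prod.fst)).map (pvGroup (ps ++ [p])))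
        simp only [List.map_append, List.map_cons, List.map_nil]
        rw [PySem.Set.ofList_append_singleton,
          PySem.Set.add_of_not_mem (fun h => hm ((PySem.Set.mem_ofList _ _).mp (by simpa using h))),
          List.map_append]
        refine congrArg₂ (· ++ ·) ?_ ?_
        · show List.map _ _ = _
          apply List.map_congr_left
          intro m hmem
          exact (pvGroup_append_ne ps p m
            (fun h => hm (h ▸ (PySem.Set.mem_ofList _ _).mp hmem))).symm
        · have hnil : ps.filter (fun q => q.1 == p.1) = [] := by
            apply List.filter_eq_nil_iff.mpr
            intro q hq
            simp only [beq_iff_eq]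
            intro h
            exact hm (h ▸ List.mem_map_of_mem (f := Prod.fst) hq)
          simp [pvGroup, List.filter_append, hnil, pvTally, PySem.Dict.getD_empty]

-- ===== VERDICT (by name: the statement is the Claim_ definition above) =====
theorem count_class1_distributions_py_spec : Claim_equal_count_class1_distributions_py := by
  intro rows _
  show _ = _
  simp only [count_class1_distributions_py, count_class1_distributions_py_alt,
    foldl_pvAStep_filterMap, pvInvariant, PySem.List.dedup_eq_ofList,
    List.map_map]
  simp [Function.comp_def, pvGroup]
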